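-- pv_equiv track=rewrite | github.com/womogenes/6.205_final_proj | sim/utils.py | pack_bits
-- ===== SOURCE A (Python) =====
-- def pack_bits(values: list[int, int], msb=True):
--     """
--     value is a list of (value, width) pairs
--     """
--     # If MSB, this is NOT the natural ordering for 0-index
--     values = values[::-1] if msb else values
--
--     pos = 0
--     res = 0
--     for value, width in values:
--         res += (value & ((1 << width) - 1)) << pos
--         pos += width
--
--     return res
-- ===== SOURCE B (Python) =====
-- def pack_bits(values: list[int, int], msb=True):
--     """
--     value is a list of (value, width) pairs
--     """
--     res = 0
--     for value, width in (values if msb else reversed(values)):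
--         res = (res << width) | (value & ((1 << width) - 1))
--     return res
-- ===== Notes on version B (the rewrite author's own statement) =====
-- stated objective: simpler
-- what changed: Replaces the position-tracking pass (explicit pos offset, shift-into-place and add on a reversed-or-not copy) with a single left-fold accumulator res = (res << width) | (value & mask), iterating forward for msb and reversed otherwise; the pos variable and the list copy disappear.
import Mathlib
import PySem

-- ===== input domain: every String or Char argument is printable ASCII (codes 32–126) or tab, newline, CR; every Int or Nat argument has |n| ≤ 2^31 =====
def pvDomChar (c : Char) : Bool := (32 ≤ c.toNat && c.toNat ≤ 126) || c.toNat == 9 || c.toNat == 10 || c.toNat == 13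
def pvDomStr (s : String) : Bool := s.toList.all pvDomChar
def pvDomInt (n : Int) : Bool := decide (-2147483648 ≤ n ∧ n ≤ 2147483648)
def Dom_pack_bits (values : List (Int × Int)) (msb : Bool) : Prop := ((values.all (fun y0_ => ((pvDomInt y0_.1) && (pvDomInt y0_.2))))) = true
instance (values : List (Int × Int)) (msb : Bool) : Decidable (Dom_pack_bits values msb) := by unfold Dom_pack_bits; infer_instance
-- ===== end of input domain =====

-- B replaces A's position-tracking pass with a single shift-and-or left fold (forward for msb, reversed otherwise); equivalence proved for nonnegative widths (Python raises on negative shifts).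


-- ===== PORT A =====
-- A: reverse the list when msb, then one pass keeping (pos, res): res += (value & mask) << pos; pos += width.
def pack_bits (values : List (Int × Int)) (msb : Bool) : Int :=
  let values := if msb then (PySem.List.slice? values none none (-1)).getD [] else values
  let st : Int × Int :=
    values.foldl (fun (st : Int × Int) (vw : Int × Int) =>
      (st.1 + vw.2, st.2 + (PySem.Int.band vw.1 ((1 <<< vw.2.toNat) - 1)) <<< st.1.toNat)) (0, 0)
  st.2

-- ===== PORT B =====
-- B: single accumulator fold res = (res << width) | (value & mask), forward for msb, over the reversed list otherwise.
def pack_bits_alt (values : List (Int × Int)) (msb : Bool) : Int :=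
  (if msb then values else values.reverse).foldl
    (fun (res : Int) (vw : Int × Int) =>
      PySem.Int.bor (res <<< vw.2.toNat) (PySem.Int.band vw.1 ((1 <<< vw.2.toNat) - 1))) 0

-- ===== PRECONDITION & SPEC =====
-- Pre_ excludes inputs with a negative width, on which Python A raises ValueError (negative shift count).
def Pre_pack_bits (values : List (Int × Int)) (msb : Bool) : Prop :=
  ∀ vw ∈ values, 0 ≤ vw.2
instance (values : List (Int × Int)) (msb : Bool) : Decidable (Pre_pack_bits values msb) := by unfold Pre_pack_bits; infer_instance
def pvWitness_pack_bits : (List (Int × Int)) × Bool := ([(5, 3), (-1, 4), (2, 0)], true)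

def Spec_pack_bits (values : List (Int × Int)) (msb : Bool) (out : Int) : Prop := out = pack_bits_alt values msb
instance (values : List (Int × Int)) (msb : Bool) (out : Int) : Decidable (Spec_pack_bits values msb out) := by unfold Spec_pack_bits; infer_instance

-- ===== CLAIM (what is proved, stated in full; the proofs are below) =====
def Claim_equal_pack_bits : Prop := ∀ (values : List (Int × Int)) (msb : Bool), Dom_pack_bits values msb → Pre_pack_bits values msb → Spec_pack_bits values msb (pack_bits values msb)

-- ===== LEMMAS AND PROOFS =====

-- the masked field of one pair
def pvField (vw : Int × Int) : Int := PySem.Int.band vw.1 ((1 <<< vw.2.toNat) - 1)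

-- LSB-first pack of a list in iteration order
def pvPack : List (Int × Int) → Int
  | [] => 0
  | vw :: t => pvField vw + pvPack t * 2 ^ vw.2.toNat

-- disjoint OR is addition, Nat level
lemma pvNatOrAdd : ∀ (k a b : Nat), b < 2 ^ k → (a * 2 ^ k) ||| b = a * 2 ^ k + b := by
  intro k
  induction k with
  | zero => intro a b h; interval_cases b <;> simp
  | succ k ih =>
    intro a b h
    have hp : 2 ^ (k + 1) = 2 * 2 ^ k := by ring
    have hb : b >>> 1 < 2 ^ k := by rw [Nat.shiftRight_one]; omega
    have h1 : a * 2 ^ (k + 1) = Nat.bit false (a * 2 ^ k) := by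
      simp [Nat.bit_val]; rw [hp]; ring
    conv_lhs => rw [h1, ← Nat.bit_testBit_zero_shiftRight_one b]
    rw [Nat.lor_bit, ih a _ hb]
    simp only [Bool.false_or, Nat.bit_val, Nat.testBit_zero, Nat.shiftRight_one]
    have e1 : Nat.bit false (a * 2 ^ k) = 2 * (a * 2 ^ k) := by simp [Nat.bit_val]
    rcases Nat.mod_two_eq_zero_or_one b with hb2 | hb2 <;> simp [hb2] <;> omega

-- Python's x & m lies in [0, m] for a nonnegative mask m
lemma pvBandLe (a b : Int) (hb : 0 ≤ b) : PySem.Int.band a b ≤ b := by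
  unfold PySem.Int.band
  split_ifs
  all_goals
    have h : a.toNat &&& b.toNat ≤ b.toNat := Nat.and_le_right
  all_goals
    have h' : b.toNat - (b.toNat &&& (-a - 1).toNat) ≤ b.toNat := Nat.sub_le _ _
  all_goals omega

lemma pvMask_nonneg (n : Nat) : (0:Int) ≤ ((1 <<< n : Nat) : Int) - 1 := by
  have : (1:Nat) ≤ 1 <<< n := by rw [Nat.one_shiftLeft]; exact Nat.one_le_two_pow
  omega

lemma pvField_nonneg (vw : Int × Int) : 0 ≤ pvField vw := by
  simpa [pvField, PySem.Int.band_comm] using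
    PySem.Int.band_nonneg_of_nonneg_left vw.1 (pvMask_nonneg vw.2.toNat)

lemma pvField_lt (vw : Int × Int) : pvField vw < 2 ^ vw.2.toNat := by
  have h := pvBandLe vw.1 (((1 <<< vw.2.toNat : Nat) : Int) - 1) (pvMask_nonneg vw.2.toNat)
  have e : ((1 <<< vw.2.toNat : Nat) : Int) = 2 ^ vw.2.toNat := by
    rw [Nat.one_shiftLeft]; push_cast; ring
  rw [e] at h
  simpa [pvField, e] using lt_of_le_of_lt h (by omega)

lemma pvPack_nonneg (l : List (Int × Int)) : 0 ≤ pvPack l := by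
  induction l with
  | nil => simp [pvPack]
  | cons vw t ih =>
      have := pvField_nonneg vw
      have h2 : (0:Int) ≤ pvPack t * 2 ^ vw.2.toNat := by positivity
      simp [pvPack]; omega

-- bitwise-or of disjoint parts is addition
lemma bor_shift_add (a b : Int) (k : Nat) (ha : 0 ≤ a) (hb : 0 ≤ b) (hbk : b < 2 ^ k) :
    PySem.Int.bor (a <<< k) b = a * 2 ^ k + b := by
  obtain ⟨m, rfl⟩ := Int.eq_ofNat_of_zero_le ha
  obtain ⟨n, rfl⟩ := Int.eq_ofNat_of_zero_le hb
  have hk : n < 2 ^ k := by exact_mod_cast hbk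
  have e : ((m:Int) <<< k) = ((m <<< k : Nat) : Int) := by
    rw [Int.shiftLeft_eq, Nat.shiftLeft_eq]; push_cast; ring
  rw [e, PySem.Int.bor_natCast, Nat.shiftLeft_eq, pvNatOrAdd k m n hk]
  push_cast; ring

-- A's loop computes res + pvPack l * 2^pos
lemma loopA (l : List (Int × Int)) (pos res : Int) (hpos : 0 ≤ pos)
    (hw : ∀ vw ∈ l, 0 ≤ vw.2) :
    (l.foldl (fun (st : Int × Int) (vw : Int × Int) =>
      (st.1 + vw.2, st.2 + (PySem.Int.band vw.1 ((1 <<< vw.2.toNat) - 1)) <<< st.1.toNat)) (pos, res)).2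
      = res + pvPack l * 2 ^ pos.toNat := by
  induction l generalizing pos res with
  | nil => simp [pvPack]
  | cons vw t ih =>
      have hw0 : 0 ≤ vw.2 := hw vw (by simp)
      have ht : ∀ x ∈ t, 0 ≤ x.2 := fun x hx => hw x (by simp [hx])
      simp only [List.foldl_cons]
      rw [ih (pos + vw.2) _ (by omega) ht]
      have e : (pos + vw.2).toNat = pos.toNat + vw.2.toNat := by omega
      rw [e, pvPack, Int.shiftLeft_eq, pow_add]
      show res + pvField vw * 2 ^ pos.toNat + pvPack t * (2 ^ pos.toNat * 2 ^ vw.2.toNat) = _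
      ring

-- B's fold over l.reverse computes acc * 2^(total width) + pvPack l
lemma loopB (l : List (Int × Int)) (acc : Int) (hacc : 0 ≤ acc)
    (hw : ∀ vw ∈ l, 0 ≤ vw.2) :
    l.reverse.foldl (fun (res : Int) (vw : Int × Int) =>
      PySem.Int.bor (res <<< vw.2.toNat) (PySem.Int.band vw.1 ((1 <<< vw.2.toNat) - 1))) acc
      = acc * 2 ^ (l.map (fun vw => vw.2.toNat)).sum + pvPack l := by
  rw [List.foldl_reverse]
  induction l generalizing acc with
  | nil => simp [pvPack]
  | cons vw t ih =>
      have ht : ∀ x ∈ t, 0 ≤ x.2 := fun x hx => hw x (by simp [hx])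
      simp only [List.foldr_cons]
      rw [ih acc hacc ht]
      have e0 : PySem.Int.band vw.1 (((1 <<< vw.2.toNat : Nat) : Int) - 1) = pvField vw := rfl
      rw [e0]
      have hr : 0 ≤ acc * 2 ^ (t.map (fun vw => vw.2.toNat)).sum + pvPack t := by
        have := pvPack_nonneg t
        positivity
      rw [bor_shift_add _ _ _ hr (pvField_nonneg vw) (pvField_lt vw)]
      rw [pvPack, List.map_cons, List.sum_cons, pow_add]
      show (acc * 2 ^ (t.map (fun vw => vw.2.toNat)).sum + pvPack t) * 2 ^ vw.2.toNat + pvField vw = _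
      ring

-- ===== VERDICT (by name: the statement is the Claim_ definition above) =====
theorem pack_bits_spec : Claim_equal_pack_bits := by
  intro values msb _ hpre
  unfold Spec_pack_bits pack_bits pack_bits_alt
  cases msb with
  | true =>
      simp only [if_true, PySem.List.slice?_none_none_neg_one, Option.getD_some]
      have h1 := loopA values.reverse 0 0 le_rfl (by intro vw h; exact hpre vw (List.mem_reverse.mp h))
      have h2 := loopB values.reverse 0 le_rfl (by intro vw h; exact hpre vw (List.mem_reverse.mp h))
      rw [h1]; rw [List.reverse_reverse] at h2; rw [h2]; simp
  | false =>
      simp only [Bool.false_eq_true, if_false]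
      have h1 := loopA values 0 0 le_rfl hpre
      have h2 := loopB values 0 le_rfl hpre
      rw [h1, h2]; simp
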